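-- pv_equiv track=rewrite | github.com/kangshwan/Algorithm_Training | PART1/BOJ1292_so.py | easy
-- ===== SOURCE A (Python) =====
-- def easy(n, k):
--   temp = []
--   sum = 0
--   for i in range(1, k+1):
--     for j in range(1, i+1):
--       temp.append(i)
--   for w in temp[n-1:k]:
--     sum += w
--
--   return sum
-- ===== SOURCE B (Python) =====
-- def easy(n, k):
--     # value at 1-based position p is the block index i with i*(i-1)//2 < p <= i*(i+1)//2;
--     # sum positions n..k by adding each block's overlap with the index window [n-1, k).
--     start = max(n - 1, 0)
--     s = 0
--     for i in range(1, k + 1):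
--         lo = i * (i - 1) // 2
--         hi = lo + i
--         a = max(lo, start)
--         b = min(hi, k)
--         if a < b:
--             s += i * (b - a)
--     return s
-- ===== Notes on version B (the rewrite author's own statement) =====
-- stated objective: faster
-- what changed: Instead of materializing the O(k^2)-element run-length list and summing a slice of it, B adds each block's overlap with the index window [n-1, k) using triangular-number block bounds, an O(k) loop with no list.
-- intended difference: For n <= 0 with k >= 2 and n >= 2 - k*(k+1)//2, A's slice temp[n-1:k] wraps the negative start to near the END of the list and returns a truncated (often 0) sum, while B sums the sequence from the beginning through position k, the intended value for a start position before 1. — e.g. on easy(0, 2): A returns 0, B returns 3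
import Mathlib
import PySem

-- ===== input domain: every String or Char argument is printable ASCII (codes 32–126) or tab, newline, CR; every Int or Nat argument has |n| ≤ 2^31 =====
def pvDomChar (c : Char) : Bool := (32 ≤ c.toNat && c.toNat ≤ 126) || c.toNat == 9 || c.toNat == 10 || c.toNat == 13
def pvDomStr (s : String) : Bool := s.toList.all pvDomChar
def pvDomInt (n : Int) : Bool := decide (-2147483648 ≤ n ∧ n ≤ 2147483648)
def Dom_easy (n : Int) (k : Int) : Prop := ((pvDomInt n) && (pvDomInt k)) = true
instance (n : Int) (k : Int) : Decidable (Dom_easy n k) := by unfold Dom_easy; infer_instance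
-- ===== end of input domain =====

-- B sums per-block overlaps with the index window [n-1, k) via triangular-number bounds instead of building A's quadratic-size list; outside D_easy the return values agree.

-- ===== PORT A =====
def easy (n : Int) (k : Int) : Int :=
  let temp : List Int :=
    (PySem.List.pyRange 1 (k+1) 1).foldl
      (fun temp i => (PySem.List.pyRange 1 (i+1) 1).foldl (fun t _j => t ++ [i]) temp) []
  (PySem.List.slice temp (some (n-1)) (some k)).foldl (fun s w => s + w) 0

-- ===== PORT B =====
def easy_alt (n : Int) (k : Int) : Int :=
  let start : Int := max (n - 1) 0
  (PySem.List.pyRange 1 (k+1) 1).foldl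
    (fun s i =>
      let lo := PySem.Int.floordiv (i * (i - 1)) 2
      let hi := lo + i
      let a := max lo start
      let b := min hi k
      if a < b then s + i * (b - a) else s) 0

-- ===== PRECONDITION & SPEC =====
-- For n ≤ 0 with k ≥ 2 and n ≥ 2 - k*(k+1)//2, A's slice temp[n-1:k] wraps the negative start
-- to near the END of the list and returns a truncated (often 0) sum, while B sums the sequence
-- from the beginning through position k — the intended value for a start position before 1.
def D_easy (n : Int) (k : Int) : Prop :=
  2 ≤ k ∧ n ≤ 0 ∧ 2 - PySem.Int.floordiv (k * (k + 1)) 2 ≤ n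
instance (n : Int) (k : Int) : Decidable (D_easy n k) := by unfold D_easy; infer_instance
def Spec_easy (n : Int) (k : Int) (out : Int) : Prop := ¬ D_easy n k → out = easy_alt n k
instance (n : Int) (k : Int) (out : Int) : Decidable (Spec_easy n k out) := by unfold Spec_easy; infer_instance
def pvDiffWitness_easy : Int × Int := (0, 2)
def pvDiffWitnessOut_easy : Int × Int := (0, 3)

-- ===== CLAIM (what is proved, stated in full; the proofs are below) =====
def Claim_unchanged_easy : Prop := ∀ (n : Int) (k : Int), Dom_easy n k → Spec_easy n k (easy n k)
def Claim_changed_easy : Prop := Dom_easy (pvDiffWitness_easy.1) (pvDiffWitness_easy.2) ∧ D_easy (pvDiffWitness_easy.1) (pvDiffWitness_easy.2) ∧ easy (pvDiffWitness_easy.1) (pvDiffWitness_easy.2) = pvDiffWitnessOut_easy.1 ∧ easy_alt (pvDiffWitness_easy.1) (pvDiffWitness_easy.2) = pvDiffWitnessOut_easy.2 ∧ pvDiffWitnessOut_easy.1 ≠ pvDiffWitnessOut_easy.2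
def Claim_exact_easy : Prop := ∀ (n : Int) (k : Int), Dom_easy n k → D_easy n k → easy n k ≠ easy_alt n k

-- ===== LEMMAS AND PROOFS =====

/-- triangular number: number of elements in the first `t` blocks of 1,2,2,3,3,3,… -/
def triN (t : Nat) : Nat := t * (t + 1) / 2

/-- the run-length list 1,2,2,3,3,3,… with `K` blocks -/
def runL (K : Nat) : List Int :=
  (List.range K).flatMap (fun t => List.replicate (t + 1) ((t : Int) + 1))

/-- overlap contribution of block `t` with the index window `[a, b)` -/
def contN (a b t : Nat) : Nat := (t + 1) * (min (triN (t + 1)) b - max (triN t) a)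

theorem triN_succ (t : Nat) : triN (t + 1) = triN t + (t + 1) := by
  unfold triN
  rw [show (t+1) * (t+1+1) = t * (t+1) + (t+1) * 2 by ring,
      Nat.add_mul_div_right _ _ (by norm_num)]

theorem triN_mono {s t : Nat} (h : s ≤ t) : triN s ≤ triN t :=
  Nat.div_le_div_right (Nat.mul_le_mul h (by omega))

theorem le_triN (t : Nat) : t ≤ triN t := by
  unfold triN
  rw [Nat.le_div_iff_mul_le (by norm_num)]
  rcases Nat.eq_zero_or_pos t with h | h
  · simp [h]
  · exact Nat.mul_le_mul_left _ (by omega)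

theorem length_runL (K : Nat) : (runL K).length = triN K := by
  induction K with
  | zero => simp [runL, triN]
  | succ m ih => simp [runL, List.range_succ, triN_succ] at ih ⊢; omega

theorem runL_succ (K : Nat) :
    runL (K + 1) = runL K ++ List.replicate (K + 1) ((K : Int) + 1) := by
  simp [runL, List.range_succ]

/-- A's temp list is `runL k.toNat`. -/
theorem temp_eq (k : Int) :
    ((PySem.List.pyRange 1 (k+1) 1).foldl
      (fun temp i => (PySem.List.pyRange 1 (i+1) 1).foldl (fun t _j => t ++ [i]) temp) []) =
    runL k.toNat := by
  have h1 : ∀ (acc : List Int) (i : Int),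
      (PySem.List.pyRange 1 (i+1) 1).foldl (fun t _j => t ++ [i]) acc
        = acc ++ (PySem.List.pyRange 1 (i+1) 1).map (fun _ => i) :=
    fun acc i => PySem.List.foldl_append_singleton_eq_map (f := fun _ => i) _ _
  simp only [h1]
  rw [PySem.List.foldl_append_eq_flatMap, PySem.List.pyRange_one 1 (k+1)]
  simp only [List.nil_append, List.flatMap_map, runL]
  have hk : (k + 1 - 1).toNat = k.toNat := by omega
  rw [hk]
  congr 1
  funext t
  have hlen : (PySem.List.pyRange 1 (1 + (t:Int) + 1) 1).length = t + 1 := by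
    rw [PySem.List.length_pyRange_one]; omega
  rw [List.map_const', hlen]
  congr 1
  omega

/-- the slice sum over `runL K` equals the sum of per-block overlaps -/
theorem slice_sum (K : Nat) (a b : Nat) :
    (((runL K).drop a).take (b - a)).sum
      = ((((List.range K).map (contN a b)).sum : Nat) : Int) := by
  induction K with
  | zero => simp [runL]
  | succ m ih =>
    rw [runL_succ, List.drop_append, List.take_append,
        List.sum_append, List.range_succ, List.map_append, List.sum_append, ih]
    push_cast
    congr 1
    rw [List.drop_replicate, List.take_replicate, List.sum_replicate]
    simp only [List.length_drop, length_runL]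
    have hcount :
        min (b - a - (triN m - a)) (m + 1 - (a - triN m))
          = min (triN (m + 1)) b - max (triN m) a := by
      have := triN_succ m; omega
    rw [hcount]
    simp only [List.map_cons, List.map_nil, List.sum_cons, List.sum_nil, add_zero, contN]
    by_cases h : max (triN m) a ≤ min (triN (m + 1)) b
    · push_cast [nsmul_eq_mul, Nat.cast_sub h]
      ring
    · have h0 : min (triN (m + 1)) b - max (triN m) a = 0 := by omega
      simp [h0]

/-- B's loop is the sum of per-block overlap counts -/
theorem alt_sum (aN bN : Nat) : ∀ (m : Nat),
    (PySem.List.pyRange 1 ((m:Int)+1) 1).foldl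
      (fun s i =>
        let lo := PySem.Int.floordiv (i * (i - 1)) 2
        let hi := lo + i
        let a := max lo ((aN:Nat):Int)
        let b := min hi ((bN:Nat):Int)
        if a < b then s + i * (b - a) else s) 0
    = ((((List.range m).map (contN aN bN)).sum : Nat) : Int) := by
  intro m
  induction m with
  | zero => simp [PySem.List.pyRange_one_eq_nil]
  | succ m ih =>
    have hb1 : ((m+1:Nat):Int) + 1 = (((m:Nat):Int) + 1) + 1 := by push_cast; ring
    rw [hb1, PySem.List.pyRange_one_succ_right (by omega), List.foldl_append, ih,
        List.foldl_cons, List.foldl_nil]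
    rw [List.range_succ, List.map_append, List.sum_append]
    push_cast
    simp only [List.map_cons, List.map_nil, List.sum_cons, List.sum_nil, add_zero]
    have hlo : ((m:Int)+1) * (((m:Int)+1) - 1) = ((m * (m + 1) : Nat) : Int) := by
      push_cast; ring
    have hfd : PySem.Int.floordiv ((m * (m + 1) : Nat) : Int) 2 = ((triN m : Nat) : Int) := by
      exact_mod_cast PySem.Int.floordiv_natCast (m * (m + 1)) 2
    simp only [hlo, hfd]
    have hhi : ((triN m : Nat) : Int) + ((m:Int)+1) = ((triN (m+1) : Nat) : Int) := by
      push_cast [triN_succ]; ring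
    rw [hhi]
    have ha : max ((triN m : Nat) : Int) (aN:Int) = ((max (triN m) aN : Nat) : Int) := by
      push_cast [Nat.cast_max]; ring_nf
    have hb : min ((triN (m+1) : Nat) : Int) (bN:Int) = ((min (triN (m+1)) bN : Nat) : Int) := by
      push_cast [Nat.cast_min]; ring_nf
    rw [ha, hb]
    unfold contN
    by_cases h : max (triN m) aN < min (triN (m+1)) bN
    · rw [if_pos (by exact_mod_cast h), Nat.cast_mul, Nat.cast_sub h.le]
      push_cast; ring
    · rw [if_neg (by exact_mod_cast h)]
      have h0 : min (triN (m+1)) bN - max (triN m) aN = 0 := by omega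
      simp [h0]

/-- floordiv of k(k+1) by 2 is the triangular number of k.toNat for k ≥ 0 -/
theorem floordiv_tri (k : Int) (hk : 0 ≤ k) :
    PySem.Int.floordiv (k * (k + 1)) 2 = ((triN k.toNat : Nat) : Int) := by
  have hkk : k = (k.toNat : Int) := by omega
  rw [hkk, show ((k.toNat:Int)) * ((k.toNat:Int) + 1) = ((k.toNat * (k.toNat + 1) : Nat) : Int) by push_cast; ring]
  exact_mod_cast PySem.Int.floordiv_natCast (k.toNat * (k.toNat + 1)) 2

/-- both ports equal per-block sums over their respective windows (k ≥ 1) -/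
theorem easy_as_sum (n k : Int) (_hk : 1 ≤ k) :
    easy n k = ((((List.range k.toNat).map
      (contN (PySem.List.clampIdx (triN k.toNat) (n-1))
             (PySem.List.clampIdx (triN k.toNat) k))).sum : Nat) : Int) := by
  unfold easy
  rw [temp_eq]
  show (PySem.List.slice (runL k.toNat) (some (n-1)) (some k)).foldl (fun s w => s + w) 0 = _
  have hslice : PySem.List.slice (runL k.toNat) (some (n-1)) (some k)
      = ((runL k.toNat).drop (PySem.List.clampIdx (triN k.toNat) (n-1))).take
          (PySem.List.clampIdx (triN k.toNat) k - PySem.List.clampIdx (triN k.toNat) (n-1)) := by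
    simp only [PySem.List.slice, length_runL]
  rw [hslice, PySem.List.foldl_add (g := fun x => x), List.map_id', zero_add, slice_sum]

theorem easy_alt_as_sum (n k : Int) (_hk : 1 ≤ k) :
    easy_alt n k = ((((List.range k.toNat).map (contN (n-1).toNat k.toNat)).sum : Nat) : Int) := by
  unfold easy_alt
  have hstart : max (n - 1) 0 = (((n-1).toNat : Nat) : Int) := by omega
  have hk2 : k + 1 = ((k.toNat : Nat) : Int) + 1 := by omega
  have hkc : k = ((k.toNat : Nat) : Int) := by omega
  rw [hstart]
  conv_lhs => rw [hk2, hkc]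
  exact alt_sum (n-1).toNat k.toNat k.toNat

/-- the end clamp is trivial for 1 ≤ k -/
theorem clamp_end (k : Int) (hk : 1 ≤ k) :
    PySem.List.clampIdx (triN k.toNat) k = k.toNat := by
  have h2 := le_triN k.toNat
  unfold PySem.List.clampIdx
  split_ifs <;> omega

/-- outside D_ the two windows give the same per-block count -/
theorem cont_window_eq (n k : Int) (hk : 1 ≤ k) (hD : ¬ D_easy n k) (t : Nat)
    (ht : t < k.toNat) :
    contN (PySem.List.clampIdx (triN k.toNat) (n-1)) k.toNat t
      = contN (n-1).toNat k.toNat t := by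
  have htle : triN (t + 1) ≤ triN k.toNat := triN_mono (by omega)
  unfold D_easy at hD
  rw [floordiv_tri k (by omega)] at hD
  push Not at hD
  unfold contN
  congr 1
  by_cases hn : 1 ≤ n
  · -- start index nonnegative: clamp is min with the length
    have hcl : PySem.List.clampIdx (triN k.toNat) (n-1) = min (n-1).toNat (triN k.toNat) := by
      unfold PySem.List.clampIdx; split_ifs <;> omega
    rw [hcl]
    by_cases hbig : (n-1).toNat ≤ triN k.toNat
    · rw [min_eq_left hbig]
    · -- window starts past the end: both counts are 0
      omega
  · -- n ≤ 0: ¬D forces k = 1 or n ≤ 1 - total, so the clamp lands at 0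
    have hcl : PySem.List.clampIdx (triN k.toNat) (n-1) = 0 := by
      rcases lt_or_ge k 2 with h1 | h2
      · have hk1 : k.toNat = 1 := by omega
        unfold PySem.List.clampIdx
        rw [hk1]
        have : triN 1 = 1 := by decide
        split_ifs <;> omega
      · have := hD h2 (by omega)
        unfold PySem.List.clampIdx
        split_ifs <;> omega
    rw [hcl]
    have : (n-1).toNat = 0 := by omega
    rw [this]

/-- inside D_: B's window strictly exceeds A's blockwise (block 0 contributes to B only) -/
theorem sum_window_lt (a b m : Nat) (ha1 : 1 ≤ a) (hb1 : 1 ≤ b) :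
    ((List.range (m+1)).map (contN a b)).sum < ((List.range (m+1)).map (contN 0 b)).sum := by
  rw [List.range_succ_eq_map]
  simp only [List.map_cons, List.sum_cons, List.map_map, Function.comp_def]
  have hle : ((List.range m).map (fun t => contN a b (Nat.succ t))).sum
      ≤ ((List.range m).map (fun t => contN 0 b (Nat.succ t))).sum := by
    apply List.sum_le_sum
    intro t _
    unfold contN
    have h1 : max (triN (Nat.succ t)) 0 ≤ max (triN (Nat.succ t)) a :=
      max_le_max_left _ (Nat.zero_le a)
    exact Nat.mul_le_mul_left _ (Nat.sub_le_sub_left h1 _)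
  have h0a : contN a b 0 = 0 := by
    unfold contN
    have h1 : triN 1 = 1 := by decide
    have h2 : triN 0 = 0 := by decide
    rw [h1, h2]
    omega
  have h0b : contN 0 b 0 = 1 := by
    unfold contN
    have h1 : triN 1 = 1 := by decide
    have h2 : triN 0 = 0 := by decide
    rw [h1, h2]
    omega
  omega

-- ===== VERDICT (by name: the statements are the Claim_ definitions above) =====
theorem easy_spec : Claim_unchanged_easy := by
  intro n k _ hD
  by_cases hk : 1 ≤ k
  · rw [easy_as_sum n k hk, easy_alt_as_sum n k hk, clamp_end k hk]
    congr 2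
    apply List.map_congr_left
    intro t ht
    exact cont_window_eq n k hk hD t (List.mem_range.mp ht)
  · unfold easy easy_alt
    have h1 : PySem.List.pyRange 1 (k+1) 1 = [] := PySem.List.pyRange_one_eq_nil (by omega)
    rw [h1]
    simp [PySem.List.slice, PySem.List.clampIdx]

theorem easy_changed : Claim_changed_easy := by unfold Claim_changed_easy; decide

theorem easy_tight : Claim_exact_easy := by
  intro n k _ hD
  obtain ⟨hk, hn, hlo⟩ := hD
  rw [floordiv_tri k (by omega)] at hlo
  have hk1 : 1 ≤ k := by omega
  rw [easy_as_sum n k hk1, easy_alt_as_sum n k hk1, clamp_end k hk1]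
  have hb : (n-1).toNat = 0 := by omega
  rw [hb]
  set a : Nat := PySem.List.clampIdx (triN k.toNat) (n-1) with ha
  have ha1 : 1 ≤ a := by
    rw [ha]; unfold PySem.List.clampIdx; split_ifs <;> omega
  obtain ⟨m, hm⟩ : ∃ m, k.toNat = m + 1 := ⟨k.toNat - 1, by omega⟩
  rw [hm]
  have := sum_window_lt a (m+1) m ha1 (by omega)
  rw [← hm] at this ⊢
  rw [hm] at this ⊢
  intro hEq
  exact absurd (by exact_mod_cast hEq) (Nat.ne_of_lt this)
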